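-- pv_equiv track=rewrite | github.com/Scytheroid/school | Java/fotky.py | is_face_on_photo
-- ===== SOURCE A (Python) =====
-- def is_face_on_photo(photo):
--     mask = [[0, 0], [0, 1], [1, 0], [1, 1]]
--     check = 1
--     dictionary = {
--         'f': 2,
--         'a': 3,
--         'c': 5,
--         'e': 7
--     }
--
--     for i in range(0,len(photo) - 1):
--         for j in range(0, len(photo[0]) - 1):
--             if photo[i][j] == 'f' or 'a' or 'c' or 'e':
--                 for k in range(4):
--                     check *= dictionary.get(photo[i + mask[k][0]][j + mask[k][1]], 1)
--                 if check == 2*3*5*7: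
--                     return(True)
--                 else:
--                     check = 1
--     return(False)
-- ===== SOURCE B (Python) =====
-- def is_face_on_photo(photo):
--     n = len(photo)
--     w = len(photo[0]) if photo else 0
--     if n < 2 or w < 2:
--         return False
--     # staged passes: for each letter, a horizontal-OR pass then a vertical-OR pass
--     # yields "letter occurs in the 2x2 window at (i,j)"; AND the four letter masks.
--     # A window holds exactly {f,a,c,e} iff all four letters occur in its 4 cells.
--     acc = [[True] * (w - 1) for _ in range(n - 1)]
--     for ch in 'face':
--         h = [[row[j] == ch or row[j + 1] == ch for j in range(w - 1)] for row in photo]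
--         acc = [[acc[i][j] and (h[i][j] or h[i + 1][j]) for j in range(w - 1)]
--                for i in range(n - 1)]
--     return any(map(any, acc))
-- ===== Notes on version B (the rewrite author's own statement) =====
-- stated objective: alternative
-- what changed: Replaces A's per-window scan (prime-product fingerprint of each 2x2 window inside a double index loop with early return) by staged whole-grid passes: for each of the four letters a horizontal-OR pass then a vertical-OR pass build a boolean mask 'letter occurs in the 2x2 window here'; the four masks are ANDed and the result is any() over the final mask -- correct because a 4-cell window equals {f,a,c,e} exactly when each of the four letters occurs in it (pigeonhole).
-- outside the precondition, e.g. on is_face_on_photo([['f', 'a', 'x'], ['c', 'e']]): A returns True, B raises IndexError; on is_face_on_photo([['x', 'a', 'b'], ['c', 'e']]): A raises IndexError, B raises IndexError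
import Mathlib
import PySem

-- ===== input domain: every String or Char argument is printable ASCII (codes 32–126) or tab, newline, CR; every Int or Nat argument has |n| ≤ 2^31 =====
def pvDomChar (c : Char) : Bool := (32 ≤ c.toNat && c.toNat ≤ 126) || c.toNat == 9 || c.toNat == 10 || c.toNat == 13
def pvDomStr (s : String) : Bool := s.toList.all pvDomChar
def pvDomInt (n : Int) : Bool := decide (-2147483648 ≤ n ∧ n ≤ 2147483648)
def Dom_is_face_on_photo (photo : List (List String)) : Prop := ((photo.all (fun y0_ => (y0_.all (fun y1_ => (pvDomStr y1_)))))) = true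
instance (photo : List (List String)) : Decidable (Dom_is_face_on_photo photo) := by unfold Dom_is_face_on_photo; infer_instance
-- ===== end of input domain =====

-- B replaces A's per-window prime-product scan by staged whole-grid passes: per letter a
-- horizontal-OR then a vertical-OR mask, ANDed over the four letters (objective: alternative).

-- ===== PORT A =====
-- dictionary.get(s, 1)
def pvFaceDictGet (s : String) : Int :=
  if s = "f" then 2 else if s = "a" then 3 else if s = "c" then 5 else if s = "e" then 7 else 1

def is_face_on_photo (photo : List (List String)) : Bool :=
  -- mask = [[0,0],[0,1],[1,0],[1,1]]
  let mask : List (Nat × Nat) := [(0, 0), (0, 1), (1, 0), (1, 1)]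
  -- for i in range(0, len(photo)-1): for j in range(0, len(photo[0])-1): … with early
  -- return True = .any; the Python condition `photo[i][j] == 'f' or 'a' or 'c' or 'e'`
  -- is always truthy, so the window is always tested
  (List.range (photo.length - 1)).any fun i =>
    (List.range ((photo.headD []).length - 1)).any fun j =>
      -- check = 1; for k in range(4): check *= dictionary.get(photo[i+mask[k][0]][j+mask[k][1]], 1)
      -- (check is reset to 1 after each tested window, so it is a per-window product;
      --  indices are in range under Pre_, where getD is exactly photo[…][…])
      let check : Int :=
        mask.foldl (fun check m => check * pvFaceDictGet ((photo.getD (i + m.1) []).getD (j + m.2) "")) 1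
      check == 210

-- ===== PORT B =====
def is_face_on_photo_alt (photo : List (List String)) : Bool :=
  -- n = len(photo); w = len(photo[0]) if photo else 0; early False for degenerate sizes
  if photo.length < 2 ∨ (photo.headD []).length < 2 then false
  else
    -- acc = [[True]*(w-1) for _ in range(n-1)]; for ch in 'face': h = horizontal-OR pass,
    -- acc = acc AND vertical-OR of h; finally any(map(any, acc))
    (["f", "a", "c", "e"].foldl
      (fun acc ch =>
        let h := photo.map (fun row =>
          (List.range ((photo.headD []).length - 1)).map
            (fun j => row.getD j "" == ch || row.getD (j + 1) "" == ch))
        (List.range (photo.length - 1)).map (fun i =>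
          (List.range ((photo.headD []).length - 1)).map (fun j =>
            (acc.getD i []).getD j false &&
              ((h.getD i []).getD j false || (h.getD (i + 1) []).getD j false))))
      ((List.range (photo.length - 1)).map
        (fun _ => (List.range ((photo.headD []).length - 1)).map (fun _ => true)))).any
      (fun r => r.any id)

-- ===== PRECONDITION & SPEC =====
-- Pre_ excludes ragged grids with a row shorter than the grid width len(photo[0]) (when both
-- dimensions are ≥ 2): there the Python A can raise IndexError, and where an early hit happens
-- to return True before the short row is touched, that is an accident of A's scan order
-- (B's staged passes raise IndexError on every such grid).
def Pre_is_face_on_photo (photo : List (List String)) : Prop :=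
  photo.length ≤ 1 ∨ (photo.headD []).length ≤ 1 ∨
    ∀ row ∈ photo, (photo.headD []).length ≤ row.length
instance (photo : List (List String)) : Decidable (Pre_is_face_on_photo photo) := by
  unfold Pre_is_face_on_photo; infer_instance

def pvWitness_is_face_on_photo : List (List String) := [["f", "a"], ["c", "e"]]

def Spec_is_face_on_photo (photo : List (List String)) (out : Bool) : Prop := out = is_face_on_photo_alt photo
instance (photo : List (List String)) (out : Bool) : Decidable (Spec_is_face_on_photo photo out) := by unfold Spec_is_face_on_photo; infer_instance

-- ===== CLAIM (what is proved, stated in full; the proofs are below) =====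
def Claim_equal_is_face_on_photo : Prop := ∀ (photo : List (List String)), Dom_is_face_on_photo photo → Pre_is_face_on_photo photo → Spec_is_face_on_photo photo (is_face_on_photo photo)

-- ===== LEMMAS AND PROOFS =====

-- a rectangular boolean grid given by a function of the two indices
def pvGrid (m k : Nat) (f : Nat → Nat → Bool) : List (List Bool) :=
  (List.range m).map (fun i => (List.range k).map (fun j => f i j))

-- "letter ch occurs in the 2x2 window with top-left corner (i,j)"
def pvWin (photo : List (List String)) (i j : Nat) (ch : String) : Bool :=
  ((photo.getD i []).getD j "" == ch || (photo.getD i []).getD (j + 1) "" == ch) ||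
  ((photo.getD (i + 1) []).getD j "" == ch || (photo.getD (i + 1) []).getD (j + 1) "" == ch)

lemma pvMapRangeGetD {α : Type} (m : Nat) (f : Nat → α) (d : α) (i : Nat) (hi : i < m) :
    ((List.range m).map f).getD i d = f i := by
  simp [List.getD_eq_getElem?_getD, hi]

lemma pvMapGetD {α β : Type} (l : List α) (g : α → β) (d : α) (d' : β) (i : Nat)
    (hi : i < l.length) :
    (l.map g).getD i d' = g (l.getD i d) := by
  rw [List.getD_eq_getElem?_getD, List.getD_eq_getElem?_getD,
      List.getElem?_eq_getElem (by simpa using hi), List.getElem?_eq_getElem hi]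
  simp

lemma pvMapRangeCongr {α : Type} (m : Nat) (f g : Nat → α) (h : ∀ i, i < m → f i = g i) :
    (List.range m).map f = (List.range m).map g := by
  apply List.map_congr_left
  intro i hi
  exact h i (List.mem_range.mp hi)

-- congruence for .any over range
lemma pvAnyRangeCongr (n : Nat) (p q : Nat → Bool) (h : ∀ i, i < n → p i = q i) :
    (List.range n).any p = (List.range n).any q := by
  induction n with
  | zero => rfl
  | succ m ih =>
    rw [List.range_succ, List.any_append, List.any_append,
        ih (fun i hi => h i (by omega))]
    simp [h m (by omega)]

-- the fold step of B's port, named (definitionally equal to the port's lambda)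
def pvStep (photo : List (List String)) (acc : List (List Bool)) (ch : String) :
    List (List Bool) :=
  let h := photo.map (fun row =>
    (List.range ((photo.headD []).length - 1)).map
      (fun j => row.getD j "" == ch || row.getD (j + 1) "" == ch))
  (List.range (photo.length - 1)).map (fun i =>
    (List.range ((photo.headD []).length - 1)).map (fun j =>
      (acc.getD i []).getD j false &&
        ((h.getD i []).getD j false || (h.getD (i + 1) []).getD j false)))

-- the fold over the letters keeps a pvGrid whose entry is the AND of the per-letter window masks
lemma pvFold (photo : List (List String)) (ls : List String) (F : Nat → Nat → Bool) :
    ls.foldl (pvStep photo) (pvGrid (photo.length - 1) ((photo.headD []).length - 1) F)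
    = pvGrid (photo.length - 1) ((photo.headD []).length - 1)
        (fun i j => F i j && ls.all (pvWin photo i j)) := by
  induction ls generalizing F with
  | nil => simp [pvGrid]
  | cons ch ls ih =>
    rw [List.foldl_cons]
    have hstep :
        pvStep photo (pvGrid (photo.length - 1) ((photo.headD []).length - 1) F) ch
        = pvGrid (photo.length - 1) ((photo.headD []).length - 1)
            (fun i j => F i j && pvWin photo i j ch) := by
      simp only [pvStep]
      unfold pvGrid
      apply pvMapRangeCongr
      intro i hi
      apply pvMapRangeCongr
      intro j hj
      have hi0 : i < photo.length := by omega
      have hi1 : i + 1 < photo.length := by omega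
      rw [pvMapRangeGetD _ _ _ i hi,
          pvMapGetD photo _ [] [] i hi0, pvMapGetD photo _ [] [] (i + 1) hi1,
          pvMapRangeGetD _ _ _ j hj, pvMapRangeGetD _ _ _ j hj, pvMapRangeGetD _ _ _ j hj]
      rfl
    rw [hstep, ih]
    unfold pvGrid
    simp only [List.all_cons, Bool.and_assoc]

lemma pvGridAny (m k : Nat) (f : Nat → Nat → Bool) :
    (pvGrid m k f).any (fun r => r.any id) =
    (List.range m).any (fun i => (List.range k).any (f i)) := by
  unfold pvGrid
  rw [List.any_map]
  simp [Function.comp_def, List.any_map]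

-- B in the non-degenerate case, as a double range-scan of the four-letter window test
lemma pvAltMain (photo : List (List String))
    (h : ¬ (photo.length < 2 ∨ (photo.headD []).length < 2)) :
    is_face_on_photo_alt photo =
      (List.range (photo.length - 1)).any (fun i =>
        (List.range ((photo.headD []).length - 1)).any (fun j =>
          true && ["f", "a", "c", "e"].all (pvWin photo i j))) := by
  unfold is_face_on_photo_alt
  rw [if_neg h]
  show ((["f", "a", "c", "e"].foldl (pvStep photo)
      (pvGrid (photo.length - 1) ((photo.headD []).length - 1) (fun _ _ => true))).any
      (fun r => r.any id)) = _
  rw [pvFold, pvGridAny]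

-- classification of a cell: 0↔"f", 1↔"a", 2↔"c", 3↔"e", 4↔anything else
def pvCls (s : String) : Fin 5 :=
  if s = "f" then 0 else if s = "a" then 1 else if s = "c" then 2 else if s = "e" then 3 else 4

def pvPrime : Fin 5 → Int := ![2, 3, 5, 7, 1]

lemma pvFaceDictGet_eq (s : String) : pvFaceDictGet s = pvPrime (pvCls s) := by
  unfold pvFaceDictGet pvCls; split_ifs <;> rfl

lemma pvCls0 (s : String) : pvCls s = 0 ↔ s = "f" := by
  unfold pvCls; split_ifs <;> simp_all
lemma pvCls1 (s : String) : pvCls s = 1 ↔ s = "a" := by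
  unfold pvCls; split_ifs <;> simp_all
lemma pvCls2 (s : String) : pvCls s = 2 ↔ s = "c" := by
  unfold pvCls; split_ifs <;> simp_all
lemma pvCls3 (s : String) : pvCls s = 3 ↔ s = "e" := by
  unfold pvCls; split_ifs <;> simp_all

-- the numeric heart: the prime product is 210 iff each of the four classes 0..3 is present
lemma pvNum2 (x y z t : Fin 5) :
    ((1 * pvPrime x * pvPrime y * pvPrime z * pvPrime t) == 210) = true ↔
    ((x = 0 ∨ y = 0 ∨ z = 0 ∨ t = 0) ∧ (x = 1 ∨ y = 1 ∨ z = 1 ∨ t = 1) ∧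
     (x = 2 ∨ y = 2 ∨ z = 2 ∨ t = 2) ∧ (x = 3 ∨ y = 3 ∨ z = 3 ∨ t = 3)) := by
  revert x y z t; decide

-- per-window equivalence: A's prime-product test = B's all-four-letters-present test
lemma pvWindow2 (photo : List (List String)) (i j : Nat) :
    ((1 * pvFaceDictGet ((photo.getD i []).getD j "")
        * pvFaceDictGet ((photo.getD i []).getD (j + 1) "")
        * pvFaceDictGet ((photo.getD (i + 1) []).getD j "")
        * pvFaceDictGet ((photo.getD (i + 1) []).getD (j + 1) "")) == 210)
    = ["f", "a", "c", "e"].all (pvWin photo i j) := by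
  simp only [pvWin, List.all_cons, List.all_nil, Bool.and_true]
  generalize (photo.getD i []).getD j "" = a
  generalize (photo.getD i []).getD (j + 1) "" = b
  generalize (photo.getD (i + 1) []).getD j "" = c
  generalize (photo.getD (i + 1) []).getD (j + 1) "" = d
  rw [Bool.eq_iff_iff]
  rw [pvFaceDictGet_eq a, pvFaceDictGet_eq b, pvFaceDictGet_eq c, pvFaceDictGet_eq d, pvNum2]
  simp only [Bool.and_eq_true, Bool.or_eq_true, beq_iff_eq]
  simp only [← pvCls0, ← pvCls1, ← pvCls2, ← pvCls3]
  generalize pvCls a = x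
  generalize pvCls b = y
  generalize pvCls c = z
  generalize pvCls d = t
  revert x y z t; decide

-- ===== VERDICT (by name: the statement is the Claim_ definition above) =====
theorem is_face_on_photo_spec : Claim_equal_is_face_on_photo := by
  intro photo _hdom _hpre
  unfold Spec_is_face_on_photo
  by_cases h : photo.length < 2 ∨ (photo.headD []).length < 2
  · -- degenerate sizes: both sides are false
    unfold is_face_on_photo_alt
    rw [if_pos h]
    rcases h with hn | hw
    · have h0 : photo.length - 1 = 0 := by omega
      simp [is_face_on_photo, h0]
    · have h0 : (photo.headD []).length - 1 = 0 := by omega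
      simp only [is_face_on_photo, h0]
      simp
  · rw [pvAltMain photo h]
    unfold is_face_on_photo
    apply pvAnyRangeCongr
    intro i hi
    apply pvAnyRangeCongr
    intro j hj
    simp only [List.foldl_cons, List.foldl_nil, Nat.add_zero, Bool.true_and]
    exact pvWindow2 photo i j
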